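-- pv_equiv track=rewrite | github.com/HugoItaloMC/PythonEstudos | testesEstudos/myFunctions/strFunction.py | scan_not_vogais
-- ===== SOURCE A (Python) =====
-- def scan_not_vogais(iteravel):
--     iteravel = iteravel.lower()  # Lower case nas strings
--     result = {}  # Alocando ocorrência
--     vogais = 'bcdfghkjlmnpqrstvwxyz'  # condicão da ocorrência
--     for i in vogais:  # Indexando condicão de ocorrência
--         if i in iteravel:  # Criando caso recursivo
--             result[i] = iteravel.count(i)  # recursividade no iterador
--     return result  # retornando ocorrências alocadas
-- ===== SOURCE B (Python) =====
-- def scan_not_vogais(iteravel):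
--     cons = 'bcdfghkjlmnpqrstvwxyz'
--     counts = {}
--     for ch in iteravel.lower():  # single pass over the string
--         if ch in cons:
--             counts[ch] = counts.get(ch, 0) + 1
--     # emit in the fixed consonant order (same keys/values; dict == ignores order anyway)
--     return {c: counts[c] for c in cons if c in counts}
-- ===== Notes on version B (the rewrite author's own statement) =====
-- stated objective: alternative
-- what changed: B makes one pass over the string building a counter dict instead of A's 21 repeated .count scans, then emits the counted consonants in the fixed consonant order; fewer character comparisons asymptotically, but in CPython A's C-level .count is not beaten.
import Mathlib
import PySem

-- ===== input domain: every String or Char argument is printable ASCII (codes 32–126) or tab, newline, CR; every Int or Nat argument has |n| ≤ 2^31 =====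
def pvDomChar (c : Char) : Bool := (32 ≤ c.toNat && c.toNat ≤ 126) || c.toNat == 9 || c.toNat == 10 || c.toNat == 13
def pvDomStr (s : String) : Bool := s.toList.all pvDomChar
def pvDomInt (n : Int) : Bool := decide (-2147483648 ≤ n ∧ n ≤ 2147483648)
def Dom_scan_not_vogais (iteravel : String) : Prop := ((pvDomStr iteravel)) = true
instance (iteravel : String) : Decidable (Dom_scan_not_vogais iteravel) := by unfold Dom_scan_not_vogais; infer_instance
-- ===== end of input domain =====

-- Alternative algorithm: B makes one pass over the string building a counter dict (instead of
-- A's 21 repeated `.count` scans), then emits the counted consonants in the fixed consonant order.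

-- the consonant literal 'bcdfghkjlmnpqrstvwxyz' both Pythons carry (note: k before j, as in the source)
def pvCons : List Char := "bcdfghkjlmnpqrstvwxyz".toList

-- ===== PORT A =====
def scan_not_vogais (iteravel : String) : List (String × Int) :=
  let s := PySem.Chars.lower iteravel.toList
  (pvCons.foldl
    (fun (result : PySem.Dict String Int) i =>
      if PySem.Chars.isIn [i] s then
        result.insert (String.ofList [i]) ((PySem.Chars.count s [i] : Int))
      else result)
    PySem.Dict.empty).items

-- ===== PORT B =====
def scan_not_vogais_alt (iteravel : String) : List (String × Int) :=
  let counts := (PySem.Chars.lower iteravel.toList).foldl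
    (fun (d : PySem.Dict Char Int) ch =>
      if PySem.Chars.isIn [ch] pvCons then d.insert ch (d.getD ch 0 + 1) else d)
    PySem.Dict.empty
  -- the dict comprehension {c: counts[c] for c in cons if c in counts}; counts[c] is exact as
  -- getD under the 'c in counts' guard
  pvCons.foldl
    (fun (acc : List (String × Int)) c =>
      if counts.contains c then acc ++ [(String.ofList [c], counts.getD c 0)] else acc)
    []

-- ===== PRECONDITION & SPEC =====
def Spec_scan_not_vogais (iteravel : String) (out : List (String × Int)) : Prop := out = scan_not_vogais_alt iteravel
instance (iteravel : String) (out : List (String × Int)) : Decidable (Spec_scan_not_vogais iteravel out) := by unfold Spec_scan_not_vogais; infer_instance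

-- ===== CLAIM (what is proved, stated in full; the proofs are below) =====
def Claim_equal_scan_not_vogais : Prop := ∀ (iteravel : String), Dom_scan_not_vogais iteravel → Spec_scan_not_vogais iteravel (scan_not_vogais iteravel)

-- ===== LEMMAS AND PROOFS =====

-- 'c in s' for a single character c is membership of c in s
theorem pv_isIn_singleton (c : Char) (l : List Char) : PySem.Chars.isIn [c] l = decide (c ∈ l) := by
  rcases h : PySem.Chars.isIn [c] l with _ | _
  · rw [PySem.Chars.isIn_eq_false_iff, List.singleton_infix_iff] at h; simpa using h
  · rw [PySem.Chars.isIn_iff_infix, List.singleton_infix_iff] at h; simpa using h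

theorem pv_count_go_singleton (c : Char) : ∀ (fuel : Nat) (l : List Char) (acc : Nat),
    l.length ≤ fuel → PySem.Chars.count.go [c] fuel l acc = acc + l.count c := by
  intro fuel
  induction fuel with
  | zero => intro l acc h; simp at h; subst h; simp [PySem.Chars.count.go]
  | succ n ih =>
    intro l acc h
    cases l with
    | nil => simp [PySem.Chars.count.go]
    | cons x t =>
      simp only [PySem.Chars.count.go]
      by_cases hx : c = x
      · subst hx; simp [List.isPrefixOf, ih t (acc + 1) (by simpa using h)]; omega
      · simp [List.isPrefixOf, hx, Ne.symm hx, ih t acc (by simpa using h)]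

-- s.count(c) for a single character c is the element count
theorem pv_count_singleton (c : Char) (l : List Char) : PySem.Chars.count l [c] = l.count c := by
  simp [PySem.Chars.count, pv_count_go_singleton c l.length l 0 le_rfl]

-- A's loop, characterised: the consonants present, in pvCons order, with their counts
theorem pv_A_eq (iteravel : String) :
    scan_not_vogais iteravel =
      (pvCons.filter (fun i => decide (i ∈ PySem.Chars.lower iteravel.toList))).map
        (fun i => (String.ofList [i], ((PySem.Chars.lower iteravel.toList).count i : Int))) := by
  simp only [scan_not_vogais]
  rw [PySem.List.foldl_if_eq_foldl_filter]
  rw [PySem.Dict.items_foldl_insert_fresh _ (fun i => String.ofList [i])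
        (fun i => ((PySem.Chars.count (PySem.Chars.lower iteravel.toList) [i] : Int))) _
        (fun a _ => PySem.Dict.contains_empty _)
        (((by decide : pvCons.Nodup).filter _).map
          (fun a b h => by simpa using congrArg String.toList h))]
  simp only [PySem.Dict.empty, List.nil_append]
  rw [List.filter_congr (fun x _ => pv_isIn_singleton x _)]
  exact List.map_congr_left (fun x _ => by rw [pv_count_singleton])

-- B's loop, characterised the same way
theorem pv_B_eq (iteravel : String) :
    scan_not_vogais_alt iteravel =
      (pvCons.filter (fun i => decide (i ∈ PySem.Chars.lower iteravel.toList))).map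
        (fun i => (String.ofList [i], ((PySem.Chars.lower iteravel.toList).count i : Int))) := by
  simp only [scan_not_vogais_alt]
  rw [PySem.List.foldl_append_if,
      PySem.List.foldl_if_eq_foldl_filter (p := fun ch => PySem.Chars.isIn [ch] pvCons),
      PySem.Dict.foldl_insert_getD_add_one_eq_counter, List.nil_append]
  have hc : ∀ c ∈ pvCons,
      (PySem.Dict.counter ((PySem.Chars.lower iteravel.toList).filter
          (fun ch => PySem.Chars.isIn [ch] pvCons))).contains c
        = decide (c ∈ PySem.Chars.lower iteravel.toList) := by
    intro c hcm
    rw [PySem.Dict.contains_counter]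
    simp [List.mem_filter, pv_isIn_singleton, hcm]
  rw [List.filter_congr hc]
  refine List.map_congr_left (fun x hx => ?_)
  rw [List.mem_filter] at hx
  rw [PySem.Dict.getD_counter, List.count_filter (by simp [pv_isIn_singleton, hx.1])]

-- ===== VERDICT (by name: the statement is the Claim_ definition above) =====
theorem scan_not_vogais_spec : Claim_equal_scan_not_vogais := by
  intro iteravel _
  unfold Spec_scan_not_vogais
  rw [pv_A_eq, pv_B_eq]
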